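-- pv_equiv track=rewrite | github.com/seismatica/PCC | 16/string_match_manual.py | find_longest_string
-- ===== SOURCE A (Python) =====
-- def find_longest_string(target_string, pos_ind_len):
--     """
--     Return the longest key string fraction found in the target string
--     :param target_string: target string where the longest strings will be extracted from
--     :param pos_ind_len: dict of position in target string and its longest leftward key string fragment
--     :return: list of longest key strings found in the target string
--     """
--     longest_matched_strings = []
--     max_length = max(pos_ind_len.values())
--     for position, length in pos_ind_len.items():
--         if length == max_length:
--             longest_matched_string = target_string[position+1-length:position+1]
--             longest_matched_strings.append(longest_matched_string)
--     return longest_matched_strings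
-- ===== SOURCE B (Python) =====
-- def find_longest_string(target_string, pos_ind_len):
--     """Single pass: keep the best length seen so far and the substrings at that length."""
--     best = None
--     result = []
--     for position, length in pos_ind_len.items():
--         if best is None or length > best:
--             best = length
--             result = [target_string[position+1-length:position+1]]
--         elif length == best:
--             result.append(target_string[position+1-length:position+1])
--     return result
-- ===== Notes on version B (the rewrite author's own statement) =====
-- stated objective: alternative
-- what changed: Replaced A's two passes (max() over the values, then a filtering loop) with one pass that maintains a running best length, resetting the accumulated list when a longer match appears.
import Mathlib
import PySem

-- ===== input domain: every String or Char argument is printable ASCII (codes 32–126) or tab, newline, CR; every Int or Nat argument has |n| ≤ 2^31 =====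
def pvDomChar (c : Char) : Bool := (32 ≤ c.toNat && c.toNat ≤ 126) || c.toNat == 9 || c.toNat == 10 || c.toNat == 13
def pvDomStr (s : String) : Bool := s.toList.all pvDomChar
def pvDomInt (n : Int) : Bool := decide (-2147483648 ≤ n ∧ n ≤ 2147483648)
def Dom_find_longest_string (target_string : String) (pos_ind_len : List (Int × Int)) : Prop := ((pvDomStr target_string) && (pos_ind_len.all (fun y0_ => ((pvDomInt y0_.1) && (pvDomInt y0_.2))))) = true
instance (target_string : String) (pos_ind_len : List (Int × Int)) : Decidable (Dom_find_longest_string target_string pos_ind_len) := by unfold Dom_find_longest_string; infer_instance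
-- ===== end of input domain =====

-- B replaces A's two passes (max over the values, then a filtering loop) by one pass with a
-- running best length; return value only, no mutation.

-- target_string[position+1-length:position+1]
def pvSlice (t : String) (position length : Int) : String :=
  PySem.Str.slice t (some (position + 1 - length)) (some (position + 1))

-- ===== PORT A =====
def find_longest_string (target_string : String) (pos_ind_len : List (Int × Int)) : List String :=
  -- max_length = max(pos_ind_len.values());  raises ValueError on an empty dict (Pre_ excludes it)
  match PySem.List.max? (pos_ind_len.map Prod.snd) (fun y => y) with
  | none => []
  | some max_length =>
    pos_ind_len.foldl (fun longest_matched_strings pl =>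
      if pl.2 = max_length then
        longest_matched_strings ++ [pvSlice target_string pl.1 pl.2]
      else longest_matched_strings) []

-- ===== PORT B =====
def pvBStep (t : String) (st : Option Int × List String) (pl : Int × Int) : Option Int × List String :=
  match st.1 with
  | none => (some pl.2, [pvSlice t pl.1 pl.2])
  | some best =>
    if pl.2 > best then (some pl.2, [pvSlice t pl.1 pl.2])
    else if pl.2 = best then (st.1, st.2 ++ [pvSlice t pl.1 pl.2])
    else st

def find_longest_string_alt (target_string : String) (pos_ind_len : List (Int × Int)) : List String :=
  (pos_ind_len.foldl (pvBStep target_string) (none, [])).2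

-- ===== PRECONDITION & SPEC =====
-- Pre_ excludes exactly the empty dict, on which A's max() raises ValueError.
def Pre_find_longest_string (target_string : String) (pos_ind_len : List (Int × Int)) : Prop :=
  pos_ind_len ≠ []
instance (target_string : String) (pos_ind_len : List (Int × Int)) : Decidable (Pre_find_longest_string target_string pos_ind_len) := by unfold Pre_find_longest_string; infer_instance

def pvWitness_find_longest_string : String × (List (Int × Int)) := ("abcba", [(2, 2), (4, 2), (1, 1)])

def Spec_find_longest_string (target_string : String) (pos_ind_len : List (Int × Int)) (out : List String) : Prop := out = find_longest_string_alt target_string pos_ind_len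
instance (target_string : String) (pos_ind_len : List (Int × Int)) (out : List String) : Decidable (Spec_find_longest_string target_string pos_ind_len out) := by unfold Spec_find_longest_string; infer_instance

-- ===== CLAIM (what is proved, stated in full; the proofs are below) =====
def Claim_equal_find_longest_string : Prop := ∀ (target_string : String) (pos_ind_len : List (Int × Int)), Dom_find_longest_string target_string pos_ind_len → Pre_find_longest_string target_string pos_ind_len → Spec_find_longest_string target_string pos_ind_len (find_longest_string target_string pos_ind_len)

-- ===== LEMMAS AND PROOFS =====

-- A's filtering loop collects exactly the slices of the pairs whose length equals m.
theorem pvAfold_char (t : String) (m : Int) (l : List (Int × Int)) (acc : List String) :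
    l.foldl (fun a pl => if pl.2 = m then a ++ [pvSlice t pl.1 pl.2] else a) acc
      = acc ++ (l.filter (fun pl => pl.2 = m)).map (fun pl => pvSlice t pl.1 pl.2) := by
  induction l generalizing acc with
  | nil => simp
  | cons x xs ih =>
    simp only [List.foldl_cons, List.filter_cons]
    by_cases h : x.2 = m <;> simp [h, ih]

-- If every value is ≤ m but none equals m', the filter at m' with m < m' is empty.
theorem pvfilter_nil (t : String) (l : List (Int × Int)) (m m' : Int)
    (hub : ∀ pl ∈ l, pl.2 ≤ m) (hlt : m < m') :
    l.filter (fun pl => pl.2 = m') = [] := by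
  apply List.filter_eq_nil_iff.mpr
  intro pl hpl
  have := hub pl hpl
  simp only [decide_eq_true_eq]
  omega

-- B's single pass over a nonempty list ends with (running max, A's filter at that max).
theorem pvBfold_char (t : String) (x : Int × Int) (l : List (Int × Int)) :
    (x :: l).foldl (pvBStep t) (none, [])
      = (some (l.foldl (fun a pl => max a pl.2) x.2),
         ((x :: l).filter (fun pl => pl.2 = l.foldl (fun a pl => max a pl.2) x.2)).map
           (fun pl => pvSlice t pl.1 pl.2)) := by
  induction l using List.reverseRecOn with
  | nil => simp [pvBStep]
  | append_singleton l y ih =>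
    have hfold : (x :: (l ++ [y])).foldl (pvBStep t) (none, [])
        = pvBStep t ((x :: l).foldl (pvBStep t) (none, [])) y := by
      simp
    set m := l.foldl (fun a pl => max a pl.2) x.2 with hm
    have hm' : (l ++ [y]).foldl (fun a pl => max a pl.2) x.2 = max m y.2 := by
      simp [hm]
    have hub : ∀ pl ∈ x :: l, pl.2 ≤ m := by
      intro pl hpl
      have h := PySem.List.le_foldl_max_int l Prod.snd x.2
      rcases List.mem_cons.mp hpl with h1 | h1
      · subst h1; exact h.1
      · exact h.2 pl h1
    have hsplit : x :: (l ++ [y]) = (x :: l) ++ [y] := rfl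
    rw [hfold, ih, hm', hsplit, List.filter_append]
    by_cases hgt : y.2 > m
    · have hmax : max m y.2 = y.2 := by omega
      have hnil : (x :: l).filter (fun pl => pl.2 = y.2) = [] :=
        pvfilter_nil t (x :: l) m y.2 hub hgt
      simp [pvBStep, hgt, hmax, hnil]
    · by_cases heq : y.2 = m
      · have hmax : max m y.2 = m := by omega
        simp [pvBStep, hgt, heq]
      · have hmax : max m y.2 = m := by omega
        have hne : ¬ (y.2 = m) := heq
        simp [pvBStep, hgt, heq, hmax]

-- max with the identity key over the mapped values is the running max over the pairs.
theorem pvfoldl_max_map (xs : List (Int × Int)) (a : Int) :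
    (xs.map Prod.snd).foldl max a = xs.foldl (fun b pl => max b pl.2) a := by
  induction xs generalizing a with
  | nil => rfl
  | cons z zs ih => simp [List.foldl_cons, ih]

-- ===== VERDICT (by name: the statement is the Claim_ definition above) =====
theorem find_longest_string_spec : Claim_equal_find_longest_string := by
  intro t l _ hpre
  unfold Spec_find_longest_string
  match l, hpre with
  | x :: xs, _ =>
    unfold find_longest_string find_longest_string_alt
    rw [pvBfold_char]
    have hmax : PySem.List.max? ((x :: xs).map Prod.snd) (fun y => y)
        = some (xs.foldl (fun a pl => max a pl.2) x.2) := by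
      rw [List.map_cons, PySem.List.max?_id_cons]
      exact congrArg some (pvfoldl_max_map xs x.2)
    rw [hmax]
    simp only [pvAfold_char, List.nil_append]
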